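-- pv_equiv track=rewrite | github.com/eduardgg/projects | games/domino/domino1.py | inici
-- ===== SOURCE A (Python) =====
-- def inici(mans):
--     # Comença qui té el doble més alt o, si no hi ha dobles,
--     # Qui tingui un nombre més alt en les peces
--     # Per exemple, (6-3) > (5-4) > (5-2)
--     for i in range(7):
--         for j in range(len(mans)):
--             if (6-i,6-i) in mans[j]:
--                 return j, (6-i,6-i)
--     for i in range(6):
--         for j in range(len(mans)):
--             if (5-i,6) in mans[j]:
--                 return j, (5-i,6)
-- ===== SOURCE B (Python) =====
-- RANKS = {(6, 6): 0, (5, 5): 1, (4, 4): 2, (3, 3): 3, (2, 2): 4, (1, 1): 5, (0, 0): 6,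
--          (5, 6): 7, (4, 6): 8, (3, 6): 9, (2, 6): 10, (1, 6): 11, (0, 6): 12}
--
-- def inici(mans):
--     best = None  # (rank, player, tile)
--     for j, hand in enumerate(mans):
--         for t in hand:
--             r = RANKS.get(t)
--             if r is not None and (best is None or r < best[0]):
--                 best = (r, j, t)
--     if best is None:
--         return None
--     return best[1], best[2]
-- ===== Notes on version B (the rewrite author's own statement) =====
-- stated objective: alternative
-- what changed: replaced A's 13 priority-ordered rescans of all hands with a precomputed tile->rank table and one single pass over every hand keeping the best (rank, player, tile) seen
import Mathlib
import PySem

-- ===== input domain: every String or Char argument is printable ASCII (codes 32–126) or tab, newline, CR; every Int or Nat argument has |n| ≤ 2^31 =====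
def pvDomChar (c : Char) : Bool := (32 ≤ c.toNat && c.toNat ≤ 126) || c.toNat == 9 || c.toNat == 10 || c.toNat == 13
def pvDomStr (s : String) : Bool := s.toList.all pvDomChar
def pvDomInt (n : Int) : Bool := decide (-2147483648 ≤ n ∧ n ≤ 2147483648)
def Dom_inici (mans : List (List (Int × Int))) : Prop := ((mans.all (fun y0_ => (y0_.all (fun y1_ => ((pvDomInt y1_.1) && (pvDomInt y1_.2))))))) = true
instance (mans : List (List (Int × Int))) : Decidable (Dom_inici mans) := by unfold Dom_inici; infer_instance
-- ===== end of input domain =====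

-- B replaces A's 13 priority-ordered rescans of all hands with a tile→rank table and ONE pass
-- over the hands keeping the best (rank, player, tile); same return value, no side effects.

-- ===== PORT A =====
-- first loop of A: for i in range(7): for j in range(len(mans)): if (6-i,6-i) in mans[j]: return j,(6-i,6-i)
-- (the inner 'for j … if … return j' scan is List.findIdx?)
def iniciDbl (mans : List (List (Int × Int))) (i : Nat) : Option (Int × (Int × Int)) :=
  if i < 7 then
    match List.findIdx? (fun h => h.contains ((6 - (i : Int), 6 - (i : Int)))) mans with
    | some k => some ((k : Int), (6 - (i : Int), 6 - (i : Int)))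
    | none => iniciDbl mans (i + 1)
  else none
termination_by 7 - i

-- second loop of A: for i in range(6): … (5-i,6) …
def iniciSix (mans : List (List (Int × Int))) (i : Nat) : Option (Int × (Int × Int)) :=
  if i < 6 then
    match List.findIdx? (fun h => h.contains ((5 - (i : Int), (6 : Int)))) mans with
    | some k => some ((k : Int), (5 - (i : Int), (6 : Int)))
    | none => iniciSix mans (i + 1)
  else none
termination_by 6 - i

def inici (mans : List (List (Int × Int))) : Option (Int × (Int × Int)) :=
  match iniciDbl mans 0 with
  | some v => some v
  | none => iniciSix mans 0

-- ===== PORT B =====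
-- RANKS = {(6,6):0, …, (0,6):12}
def pvRanks : PySem.Dict (Int × Int) Nat :=
  PySem.Dict.mk [((6,6),0), ((5,5),1), ((4,4),2), ((3,3),3), ((2,2),4), ((1,1),5), ((0,0),6),
                 ((5,6),7), ((4,6),8), ((3,6),9), ((2,6),10), ((1,6),11), ((0,6),12)]

-- body of B's inner loop: r = RANKS.get(t); if r is not None and (best is None or r < best[0]): best = (r, j, t)
def pvInner (j : Int) (b : Option (Nat × Int × (Int × Int))) (t : Int × Int) :
    Option (Nat × Int × (Int × Int)) :=
  match pvRanks.get? t with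
  | none => b
  | some r =>
    match b with
    | none => some (r, j, t)
    | some b0 => if r < b0.1 then some (r, j, t) else b

-- 'for j, hand in enumerate(mans): for t in hand: …'
def pvGo (j : Int) (b : Option (Nat × Int × (Int × Int))) :
    List (List (Int × Int)) → Option (Nat × Int × (Int × Int))
  | [] => b
  | h :: rest => pvGo (j + 1) (h.foldl (pvInner j) b) rest

def inici_alt (mans : List (List (Int × Int))) : Option (Int × (Int × Int)) :=
  match pvGo 0 none mans with
  | none => none
  | some b => some (b.2.1, b.2.2)

-- ===== PRECONDITION & SPEC =====
def Spec_inici (mans : List (List (Int × Int))) (out : Option (Int × (Int × Int))) : Prop := out = inici_alt mans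
instance (mans : List (List (Int × Int))) (out : Option (Int × (Int × Int))) : Decidable (Spec_inici mans out) := by unfold Spec_inici; infer_instance

-- ===== CLAIM (what is proved, stated in full; the proofs are below) =====
def Claim_equal_inici : Prop := ∀ (mans : List (List (Int × Int))), Dom_inici mans → Spec_inici mans (inici mans)

-- ===== LEMMAS AND PROOFS =====

def pvProj (c : Nat × Int × (Int × Int)) : Int × (Int × Int) := (c.2.1, c.2.2)

-- left-biased minimum-by-rank on optional candidates
def pvMo (a b : Option (Nat × Int × (Int × Int))) : Option (Nat × Int × (Int × Int)) :=
  match a, b with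
  | none, y => y
  | some x, none => some x
  | some x, some y => if y.1 < x.1 then some y else some x

-- best candidate of hand h at player index j, scanning the rank table in order
def pvHb (j : Int) (h : List (Int × Int)) : List ((Int × Int) × Nat) → Option (Nat × Int × (Int × Int))
  | [] => none
  | (t, r) :: l => if h.contains t then some (r, j, t) else pvHb j h l

-- A's strategy relative to a table suffix, with offset j on the found player index
def pvG (mans : List (List (Int × Int))) (j : Int) : List ((Int × Int) × Nat) → Option (Nat × Int × (Int × Int))
  | [] => none
  | (t, r) :: l =>
    match List.findIdx? (fun hh => hh.contains t) mans with
    | some k => some (r, j + (k : Int), t)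
    | none => pvG mans j l

def pvTbl : List ((Int × Int) × Nat) :=
  [((6,6),0), ((5,5),1), ((4,4),2), ((3,3),3), ((2,2),4), ((1,1),5), ((0,0),6),
   ((5,6),7), ((4,6),8), ((3,6),9), ((2,6),10), ((1,6),11), ((0,6),12)]

def pvHfold : Int → List (List (Int × Int)) → Option (Nat × Int × (Int × Int))
  | _, [] => none
  | j, h :: rest => pvMo (pvHb j h pvTbl) (pvHfold (j + 1) rest)

lemma pvMo_assoc (a b c : Option (Nat × Int × (Int × Int))) :
    pvMo (pvMo a b) c = pvMo a (pvMo b c) := by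
  rcases a with _ | x
  · rfl
  rcases b with _ | y
  · rfl
  rcases c with _ | z
  · simp only [pvMo]; split_ifs <;> rfl
  simp only [pvMo]
  by_cases h1 : y.1 < x.1 <;> by_cases h2 : z.1 < y.1 <;>
    simp [h1, h2] <;> first | rfl | omega | (intro _; exfalso; omega)

lemma pvHb_rank (j : Int) (h : List (Int × Int)) (l : List ((Int × Int) × Nat))
    (c : Nat × Int × (Int × Int)) (hc : pvHb j h l = some c) : c.1 ∈ l.map (·.2) := by
  induction l with
  | nil => simp [pvHb] at hc
  | cons p l ih =>
    obtain ⟨t, r⟩ := p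
    have e : pvHb j h ((t, r) :: l) = if h.contains t then some (r, j, t) else pvHb j h l := rfl
    rw [e] at hc
    split at hc
    · simp at hc; simp [← hc]
    · simp [ih hc]

lemma pvGet_rank (l : List ((Int × Int) × Nat)) (t : Int × Int) (r : Nat)
    (hc : (PySem.Dict.mk l).get? t = some r) : r ∈ l.map (·.2) := by
  induction l with
  | nil => simp [PySem.Dict.get?] at hc
  | cons p l ih =>
    obtain ⟨t0, r0⟩ := p
    rw [PySem.Dict.get?_mk_cons] at hc
    split at hc
    · simp_all
    · simp [ih hc]

lemma pvG_rank (mans : List (List (Int × Int))) (j : Int) (l : List ((Int × Int) × Nat))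
    (c : Nat × Int × (Int × Int)) (hc : pvG mans j l = some c) : c.1 ∈ l.map (·.2) := by
  induction l with
  | nil => simp [pvG] at hc
  | cons p l ih =>
    obtain ⟨t, r⟩ := p
    have e : pvG mans j ((t, r) :: l)
        = (match List.findIdx? (fun hh => hh.contains t) mans with
           | some k => some (r, j + (k : Int), t)
           | none => pvG mans j l) := rfl
    rw [e] at hc
    split at hc
    · simp at hc; simp [← hc]
    · simp [ih hc]

-- scanning the table in rank order vs prepending a tile to the hand
lemma pvCand_hb (l : List ((Int × Int) × Nat)) (j : Int) (t : Int × Int) (h : List (Int × Int))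
    (hl : l.Pairwise (fun a b => a.2 < b.2)) :
    pvMo (((PySem.Dict.mk l).get? t).map (fun r => (r, j, t))) (pvHb j h l) = pvHb j (t :: h) l := by
  induction l with
  | nil => simp [PySem.Dict.get?, pvHb, pvMo]
  | cons p l ih =>
    obtain ⟨t0, r0⟩ := p
    obtain ⟨hl1, hl2⟩ := List.pairwise_cons.mp hl
    have e1 : pvHb j h ((t0, r0) :: l) = if h.contains t0 then some (r0, j, t0) else pvHb j h l := rfl
    have e2 : pvHb j (t :: h) ((t0, r0) :: l)
        = if (t :: h).contains t0 then some (r0, j, t0) else pvHb j (t :: h) l := rfl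
    rw [PySem.Dict.get?_mk_cons, e1, e2]
    by_cases ht : t0 = t
    · subst ht
      have hc2 : (t0 :: h).contains t0 = true := by simp
      simp only [beq_self_eq_true, if_true, hc2]
      by_cases hh : t0 ∈ h
      · simp [hh, pvMo]
      · simp only [List.contains_eq_mem, hh, decide_false, Bool.false_eq_true, if_neg,
          not_false_eq_true, Option.map_some]
        cases hb : pvHb j h l with
        | none => simp [pvMo]
        | some c =>
          have hm := pvHb_rank j h l c hb
          have : ¬ (c.1 < r0) := by
            simp only [List.mem_map] at hm
            obtain ⟨q, hq, hq2⟩ := hm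
            have := hl1 q hq; omega
          simp [pvMo, this]
    · have hbeq : (t0 == t) = false := by simp [ht]
      have hcons : (t :: h).contains t0 = h.contains t0 := by
        simp only [List.contains_cons, hbeq, Bool.false_or]
      simp only [hbeq, Bool.false_eq_true, if_neg, not_false_eq_true, if_false, hcons]
      by_cases hh : h.contains t0
      · simp only [hh, if_true]
        cases hg : (PySem.Dict.mk l).get? t with
        | none => simp [pvMo]
        | some r =>
          have hm := pvGet_rank l t r hg
          have : r0 < r := by
            simp only [List.mem_map] at hm
            obtain ⟨q, hq, hq2⟩ := hm
            have := hl1 q hq; omega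
          simp [pvMo, this]
      · simp only [hh, Bool.false_eq_true, if_neg, not_false_eq_true, if_false]
        exact ih hl2

lemma pvInner_eq (j : Int) (b : Option (Nat × Int × (Int × Int))) (t : Int × Int) :
    pvInner j b t = pvMo b ((pvRanks.get? t).map (fun r => (r, j, t))) := by
  rw [pvInner]
  cases pvRanks.get? t with
  | none => cases b <;> simp [pvMo]
  | some r => cases b <;> simp [pvMo]

lemma pvFoldl_inner (h : List (Int × Int)) (j : Int) (b : Option (Nat × Int × (Int × Int))) :
    h.foldl (pvInner j) b = pvMo b (pvHb j h pvTbl) := by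
  induction h generalizing b with
  | nil => cases b <;> simp [pvMo, pvHb, pvTbl]
  | cons t h ih =>
    rw [List.foldl_cons, ih, pvInner_eq, pvMo_assoc]
    congr 1
    have e : pvRanks.get? t = (PySem.Dict.mk pvTbl).get? t := rfl
    rw [e, pvCand_hb pvTbl j t h (by decide)]

lemma pvGo_eq (mans : List (List (Int × Int))) (j : Int) (b : Option (Nat × Int × (Int × Int))) :
    pvGo j b mans = pvMo b (pvHfold j mans) := by
  induction mans generalizing j b with
  | nil => cases b <;> simp [pvGo, pvHfold, pvMo]
  | cons h rest ih =>
    rw [pvGo, ih, pvFoldl_inner, pvMo_assoc, pvHfold]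

lemma pvG_nil (j : Int) (l : List ((Int × Int) × Nat)) : pvG [] j l = none := by
  induction l with
  | nil => rfl
  | cons p l ih =>
    obtain ⟨t, r⟩ := p
    have e : pvG [] j ((t, r) :: l)
        = (match List.findIdx? (fun hh => hh.contains t) ([] : List (List (Int × Int))) with
           | some k => some (r, j + (k : Int), t)
           | none => pvG [] j l) := rfl
    rw [e]; simpa using ih

-- peel one hand off A's strategy
lemma pvG_cons (h : List (Int × Int)) (rest : List (List (Int × Int))) (j : Int)
    (l : List ((Int × Int) × Nat)) (hl : l.Pairwise (fun a b => a.2 < b.2)) :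
    pvG (h :: rest) j l = pvMo (pvHb j h l) (pvG rest (j + 1) l) := by
  induction l with
  | nil => simp [pvG, pvHb, pvMo]
  | cons p l ih =>
    obtain ⟨t, r⟩ := p
    obtain ⟨hl1, hl2⟩ := List.pairwise_cons.mp hl
    have eL : pvG (h :: rest) j ((t, r) :: l)
        = (match List.findIdx? (fun hh => hh.contains t) (h :: rest) with
           | some k => some (r, j + (k : Int), t)
           | none => pvG (h :: rest) j l) := rfl
    have eR : pvG rest (j + 1) ((t, r) :: l)
        = (match List.findIdx? (fun hh => hh.contains t) rest with
           | some k => some (r, (j + 1) + (k : Int), t)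
           | none => pvG rest (j + 1) l) := rfl
    have eHb : pvHb j h ((t, r) :: l) = if h.contains t then some (r, j, t) else pvHb j h l := rfl
    by_cases hc : t ∈ h
    · have hL : pvG (h :: rest) j ((t, r) :: l) = some (r, j, t) := by
        rw [eL, List.findIdx?_cons]; simp [hc]
      have hHb : pvHb j h ((t, r) :: l) = some (r, j, t) := by rw [eHb]; simp [hc]
      rw [hL, hHb]
      cases hg : pvG rest (j + 1) ((t, r) :: l) with
      | none => simp [pvMo]
      | some c =>
        have hm := pvG_rank rest (j + 1) ((t, r) :: l) c hg
        have : ¬ (c.1 < r) := by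
          simp only [List.map_cons, List.mem_cons, List.mem_map] at hm
          rcases hm with h1 | ⟨q, hq, hq2⟩
          · omega
          · have := hl1 q hq; omega
        simp [pvMo, this]
    · have hfc : List.findIdx? (fun hh => hh.contains t) (h :: rest)
          = (List.findIdx? (fun hh => hh.contains t) rest).map (· + 1) := by
        rw [List.findIdx?_cons]; simp [hc]
      have hHb : pvHb j h ((t, r) :: l) = pvHb j h l := by rw [eHb]; simp [hc]
      cases hf : List.findIdx? (fun hh => hh.contains t) rest with
      | some k =>
        have hL : pvG (h :: rest) j ((t, r) :: l) = some (r, j + ((k : Int) + 1), t) := by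
          rw [eL, hfc, hf]; simp
        have hR : pvG rest (j + 1) ((t, r) :: l) = some (r, (j + 1) + (k : Int), t) := by
          rw [eR, hf]
        rw [hL, hHb, hR]
        cases hb : pvHb j h l with
        | none => simp [pvMo]; ring
        | some c =>
          have hm := pvHb_rank j h l c hb
          have hrc : r < c.1 := by
            simp only [List.mem_map] at hm
            obtain ⟨q, hq, hq2⟩ := hm
            have := hl1 q hq; omega
          simp [pvMo, hrc]; ring
      | none =>
        have hL : pvG (h :: rest) j ((t, r) :: l) = pvG (h :: rest) j l := by
          rw [eL, hfc, hf]; simp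
        have hR : pvG rest (j + 1) ((t, r) :: l) = pvG rest (j + 1) l := by rw [eR, hf]
        rw [hL, hHb, hR]
        exact ih hl2

lemma pvKey (mans : List (List (Int × Int))) (j : Int) :
    pvG mans j pvTbl = pvHfold j mans := by
  induction mans generalizing j with
  | nil => rw [pvHfold]; exact pvG_nil j pvTbl
  | cons h rest ih =>
    rw [pvG_cons h rest j pvTbl (by decide), ih, pvHfold]

lemma pvB_bridge (mans : List (List (Int × Int))) :
    inici_alt mans = (pvHfold 0 mans).map pvProj := by
  rw [inici_alt, pvGo_eq]
  cases pvHfold 0 mans with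
  | none => simp [pvMo]
  | some c => simp [pvMo, pvProj]

lemma pvA_bridge (mans : List (List (Int × Int))) :
    inici mans = (pvG mans 0 pvTbl).map pvProj := by
  have s6 : iniciSix mans 6 = Option.map pvProj (pvG mans 0 ([] : List ((Int × Int) × Nat))) := by
    rw [iniciSix]; simp [pvG]
  have s5 : iniciSix mans 5 = Option.map pvProj (pvG mans 0 ([((0,6),12)] : List ((Int × Int) × Nat))) := by
    have e : pvG mans 0 ([((0,6),12)] : List ((Int × Int) × Nat))
        = (match List.findIdx? (fun hh => hh.contains ((0 : Int), (6 : Int))) mans with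
           | some k => some ((12 : Nat), ((0 : Int) + (k : Int), ((0 : Int), (6 : Int))))
           | none => pvG mans 0 ([] : List ((Int × Int) × Nat))) := rfl
    rw [iniciSix, e]
    norm_num
    cases hfi : List.findIdx? (fun h => decide (((0 : Int), (6 : Int)) ∈ h)) mans <;>
      simp [hfi, pvProj, s6]
  have s4 : iniciSix mans 4 = Option.map pvProj (pvG mans 0 ([((1,6),11), ((0,6),12)] : List ((Int × Int) × Nat))) := by
    have e : pvG mans 0 ([((1,6),11), ((0,6),12)] : List ((Int × Int) × Nat))
        = (match List.findIdx? (fun hh => hh.contains ((1 : Int), (6 : Int))) mans with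
           | some k => some ((11 : Nat), ((0 : Int) + (k : Int), ((1 : Int), (6 : Int))))
           | none => pvG mans 0 ([((0,6),12)] : List ((Int × Int) × Nat))) := rfl
    rw [iniciSix, e]
    norm_num
    cases hfi : List.findIdx? (fun h => decide (((1 : Int), (6 : Int)) ∈ h)) mans <;>
      simp [hfi, pvProj, s5]
  have s3 : iniciSix mans 3 = Option.map pvProj (pvG mans 0 ([((2,6),10), ((1,6),11), ((0,6),12)] : List ((Int × Int) × Nat))) := by
    have e : pvG mans 0 ([((2,6),10), ((1,6),11), ((0,6),12)] : List ((Int × Int) × Nat))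
        = (match List.findIdx? (fun hh => hh.contains ((2 : Int), (6 : Int))) mans with
           | some k => some ((10 : Nat), ((0 : Int) + (k : Int), ((2 : Int), (6 : Int))))
           | none => pvG mans 0 ([((1,6),11), ((0,6),12)] : List ((Int × Int) × Nat))) := rfl
    rw [iniciSix, e]
    norm_num
    cases hfi : List.findIdx? (fun h => decide (((2 : Int), (6 : Int)) ∈ h)) mans <;>
      simp [hfi, pvProj, s4]
  have s2 : iniciSix mans 2 = Option.map pvProj (pvG mans 0 ([((3,6),9), ((2,6),10), ((1,6),11), ((0,6),12)] : List ((Int × Int) × Nat))) := by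
    have e : pvG mans 0 ([((3,6),9), ((2,6),10), ((1,6),11), ((0,6),12)] : List ((Int × Int) × Nat))
        = (match List.findIdx? (fun hh => hh.contains ((3 : Int), (6 : Int))) mans with
           | some k => some ((9 : Nat), ((0 : Int) + (k : Int), ((3 : Int), (6 : Int))))
           | none => pvG mans 0 ([((2,6),10), ((1,6),11), ((0,6),12)] : List ((Int × Int) × Nat))) := rfl
    rw [iniciSix, e]
    norm_num
    cases hfi : List.findIdx? (fun h => decide (((3 : Int), (6 : Int)) ∈ h)) mans <;>
      simp [hfi, pvProj, s3]
  have s1 : iniciSix mans 1 = Option.map pvProj (pvG mans 0 ([((4,6),8), ((3,6),9), ((2,6),10), ((1,6),11), ((0,6),12)] : List ((Int × Int) × Nat))) := by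
    have e : pvG mans 0 ([((4,6),8), ((3,6),9), ((2,6),10), ((1,6),11), ((0,6),12)] : List ((Int × Int) × Nat))
        = (match List.findIdx? (fun hh => hh.contains ((4 : Int), (6 : Int))) mans with
           | some k => some ((8 : Nat), ((0 : Int) + (k : Int), ((4 : Int), (6 : Int))))
           | none => pvG mans 0 ([((3,6),9), ((2,6),10), ((1,6),11), ((0,6),12)] : List ((Int × Int) × Nat))) := rfl
    rw [iniciSix, e]
    norm_num
    cases hfi : List.findIdx? (fun h => decide (((4 : Int), (6 : Int)) ∈ h)) mans <;>
      simp [hfi, pvProj, s2]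
  have s0 : iniciSix mans 0 = Option.map pvProj (pvG mans 0 ([((5,6),7), ((4,6),8), ((3,6),9), ((2,6),10), ((1,6),11), ((0,6),12)] : List ((Int × Int) × Nat))) := by
    have e : pvG mans 0 ([((5,6),7), ((4,6),8), ((3,6),9), ((2,6),10), ((1,6),11), ((0,6),12)] : List ((Int × Int) × Nat))
        = (match List.findIdx? (fun hh => hh.contains ((5 : Int), (6 : Int))) mans with
           | some k => some ((7 : Nat), ((0 : Int) + (k : Int), ((5 : Int), (6 : Int))))
           | none => pvG mans 0 ([((4,6),8), ((3,6),9), ((2,6),10), ((1,6),11), ((0,6),12)] : List ((Int × Int) × Nat))) := rfl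
    rw [iniciSix, e]
    norm_num
    cases hfi : List.findIdx? (fun h => decide (((5 : Int), (6 : Int)) ∈ h)) mans <;>
      simp [hfi, pvProj, s1]
  have d7 : (match iniciDbl mans 7 with | some v => some v | none => iniciSix mans 0)
      = Option.map pvProj (pvG mans 0 ([((5,6),7), ((4,6),8), ((3,6),9), ((2,6),10), ((1,6),11), ((0,6),12)] : List ((Int × Int) × Nat))) := by
    rw [iniciDbl]; simpa using s0
  have d6 : (match iniciDbl mans 6 with | some v => some v | none => iniciSix mans 0)
      = Option.map pvProj (pvG mans 0 ([((0,0),6), ((5,6),7), ((4,6),8), ((3,6),9), ((2,6),10), ((1,6),11), ((0,6),12)] : List ((Int × Int) × Nat))) := by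
    have e : pvG mans 0 ([((0,0),6), ((5,6),7), ((4,6),8), ((3,6),9), ((2,6),10), ((1,6),11), ((0,6),12)] : List ((Int × Int) × Nat))
        = (match List.findIdx? (fun hh => hh.contains ((0 : Int), (0 : Int))) mans with
           | some k => some ((6 : Nat), ((0 : Int) + (k : Int), ((0 : Int), (0 : Int))))
           | none => pvG mans 0 ([((5,6),7), ((4,6),8), ((3,6),9), ((2,6),10), ((1,6),11), ((0,6),12)] : List ((Int × Int) × Nat))) := rfl
    rw [iniciDbl, e]
    norm_num
    cases hfi : List.findIdx? (fun h => decide (((0 : Int), (0 : Int)) ∈ h)) mans <;>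
      simp [hfi, pvProj, d7]
  have d5 : (match iniciDbl mans 5 with | some v => some v | none => iniciSix mans 0)
      = Option.map pvProj (pvG mans 0 ([((1,1),5), ((0,0),6), ((5,6),7), ((4,6),8), ((3,6),9), ((2,6),10), ((1,6),11), ((0,6),12)] : List ((Int × Int) × Nat))) := by
    have e : pvG mans 0 ([((1,1),5), ((0,0),6), ((5,6),7), ((4,6),8), ((3,6),9), ((2,6),10), ((1,6),11), ((0,6),12)] : List ((Int × Int) × Nat))
        = (match List.findIdx? (fun hh => hh.contains ((1 : Int), (1 : Int))) mans with
           | some k => some ((5 : Nat), ((0 : Int) + (k : Int), ((1 : Int), (1 : Int))))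
           | none => pvG mans 0 ([((0,0),6), ((5,6),7), ((4,6),8), ((3,6),9), ((2,6),10), ((1,6),11), ((0,6),12)] : List ((Int × Int) × Nat))) := rfl
    rw [iniciDbl, e]
    norm_num
    cases hfi : List.findIdx? (fun h => decide (((1 : Int), (1 : Int)) ∈ h)) mans <;>
      simp [hfi, pvProj, d6]
  have d4 : (match iniciDbl mans 4 with | some v => some v | none => iniciSix mans 0)
      = Option.map pvProj (pvG mans 0 ([((2,2),4), ((1,1),5), ((0,0),6), ((5,6),7), ((4,6),8), ((3,6),9), ((2,6),10), ((1,6),11), ((0,6),12)] : List ((Int × Int) × Nat))) := by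
    have e : pvG mans 0 ([((2,2),4), ((1,1),5), ((0,0),6), ((5,6),7), ((4,6),8), ((3,6),9), ((2,6),10), ((1,6),11), ((0,6),12)] : List ((Int × Int) × Nat))
        = (match List.findIdx? (fun hh => hh.contains ((2 : Int), (2 : Int))) mans with
           | some k => some ((4 : Nat), ((0 : Int) + (k : Int), ((2 : Int), (2 : Int))))
           | none => pvG mans 0 ([((1,1),5), ((0,0),6), ((5,6),7), ((4,6),8), ((3,6),9), ((2,6),10), ((1,6),11), ((0,6),12)] : List ((Int × Int) × Nat))) := rfl
    rw [iniciDbl, e]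
    norm_num
    cases hfi : List.findIdx? (fun h => decide (((2 : Int), (2 : Int)) ∈ h)) mans <;>
      simp [hfi, pvProj, d5]
  have d3 : (match iniciDbl mans 3 with | some v => some v | none => iniciSix mans 0)
      = Option.map pvProj (pvG mans 0 ([((3,3),3), ((2,2),4), ((1,1),5), ((0,0),6), ((5,6),7), ((4,6),8), ((3,6),9), ((2,6),10), ((1,6),11), ((0,6),12)] : List ((Int × Int) × Nat))) := by
    have e : pvG mans 0 ([((3,3),3), ((2,2),4), ((1,1),5), ((0,0),6), ((5,6),7), ((4,6),8), ((3,6),9), ((2,6),10), ((1,6),11), ((0,6),12)] : List ((Int × Int) × Nat))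
        = (match List.findIdx? (fun hh => hh.contains ((3 : Int), (3 : Int))) mans with
           | some k => some ((3 : Nat), ((0 : Int) + (k : Int), ((3 : Int), (3 : Int))))
           | none => pvG mans 0 ([((2,2),4), ((1,1),5), ((0,0),6), ((5,6),7), ((4,6),8), ((3,6),9), ((2,6),10), ((1,6),11), ((0,6),12)] : List ((Int × Int) × Nat))) := rfl
    rw [iniciDbl, e]
    norm_num
    cases hfi : List.findIdx? (fun h => decide (((3 : Int), (3 : Int)) ∈ h)) mans <;>
      simp [hfi, pvProj, d4]
  have d2 : (match iniciDbl mans 2 with | some v => some v | none => iniciSix mans 0)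
      = Option.map pvProj (pvG mans 0 ([((4,4),2), ((3,3),3), ((2,2),4), ((1,1),5), ((0,0),6), ((5,6),7), ((4,6),8), ((3,6),9), ((2,6),10), ((1,6),11), ((0,6),12)] : List ((Int × Int) × Nat))) := by
    have e : pvG mans 0 ([((4,4),2), ((3,3),3), ((2,2),4), ((1,1),5), ((0,0),6), ((5,6),7), ((4,6),8), ((3,6),9), ((2,6),10), ((1,6),11), ((0,6),12)] : List ((Int × Int) × Nat))
        = (match List.findIdx? (fun hh => hh.contains ((4 : Int), (4 : Int))) mans with
           | some k => some ((2 : Nat), ((0 : Int) + (k : Int), ((4 : Int), (4 : Int))))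
           | none => pvG mans 0 ([((3,3),3), ((2,2),4), ((1,1),5), ((0,0),6), ((5,6),7), ((4,6),8), ((3,6),9), ((2,6),10), ((1,6),11), ((0,6),12)] : List ((Int × Int) × Nat))) := rfl
    rw [iniciDbl, e]
    norm_num
    cases hfi : List.findIdx? (fun h => decide (((4 : Int), (4 : Int)) ∈ h)) mans <;>
      simp [hfi, pvProj, d3]
  have d1 : (match iniciDbl mans 1 with | some v => some v | none => iniciSix mans 0)
      = Option.map pvProj (pvG mans 0 ([((5,5),1), ((4,4),2), ((3,3),3), ((2,2),4), ((1,1),5), ((0,0),6), ((5,6),7), ((4,6),8), ((3,6),9), ((2,6),10), ((1,6),11), ((0,6),12)] : List ((Int × Int) × Nat))) := by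
    have e : pvG mans 0 ([((5,5),1), ((4,4),2), ((3,3),3), ((2,2),4), ((1,1),5), ((0,0),6), ((5,6),7), ((4,6),8), ((3,6),9), ((2,6),10), ((1,6),11), ((0,6),12)] : List ((Int × Int) × Nat))
        = (match List.findIdx? (fun hh => hh.contains ((5 : Int), (5 : Int))) mans with
           | some k => some ((1 : Nat), ((0 : Int) + (k : Int), ((5 : Int), (5 : Int))))
           | none => pvG mans 0 ([((4,4),2), ((3,3),3), ((2,2),4), ((1,1),5), ((0,0),6), ((5,6),7), ((4,6),8), ((3,6),9), ((2,6),10), ((1,6),11), ((0,6),12)] : List ((Int × Int) × Nat))) := rfl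
    rw [iniciDbl, e]
    norm_num
    cases hfi : List.findIdx? (fun h => decide (((5 : Int), (5 : Int)) ∈ h)) mans <;>
      simp [hfi, pvProj, d2]
  have d0 : (match iniciDbl mans 0 with | some v => some v | none => iniciSix mans 0)
      = Option.map pvProj (pvG mans 0 ([((6,6),0), ((5,5),1), ((4,4),2), ((3,3),3), ((2,2),4), ((1,1),5), ((0,0),6), ((5,6),7), ((4,6),8), ((3,6),9), ((2,6),10), ((1,6),11), ((0,6),12)] : List ((Int × Int) × Nat))) := by
    have e : pvG mans 0 ([((6,6),0), ((5,5),1), ((4,4),2), ((3,3),3), ((2,2),4), ((1,1),5), ((0,0),6), ((5,6),7), ((4,6),8), ((3,6),9), ((2,6),10), ((1,6),11), ((0,6),12)] : List ((Int × Int) × Nat))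
        = (match List.findIdx? (fun hh => hh.contains ((6 : Int), (6 : Int))) mans with
           | some k => some ((0 : Nat), ((0 : Int) + (k : Int), ((6 : Int), (6 : Int))))
           | none => pvG mans 0 ([((5,5),1), ((4,4),2), ((3,3),3), ((2,2),4), ((1,1),5), ((0,0),6), ((5,6),7), ((4,6),8), ((3,6),9), ((2,6),10), ((1,6),11), ((0,6),12)] : List ((Int × Int) × Nat))) := rfl
    rw [iniciDbl, e]
    norm_num
    cases hfi : List.findIdx? (fun h => decide (((6 : Int), (6 : Int)) ∈ h)) mans <;>
      simp [hfi, pvProj, d1]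
  unfold inici pvTbl
  exact d0

-- ===== VERDICT (by name: the statement is the Claim_ definition above) =====
theorem inici_spec : Claim_equal_inici := by
  intro mans _
  unfold Spec_inici
  rw [pvA_bridge, pvB_bridge, pvKey]
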